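-- pv_equiv track=rewrite | github.com/lu-ci/apex-sigma-core | sigma/modules/fun/economy/chevrons.py | count_chevrons
-- ===== SOURCE A (Python) =====
-- def count_chevrons(chevron_list):
--     gg = 0
--     bg = 0
--     gc = 0
--     bc = 0
--     for chev in chevron_list:
--         good = chev.get('good')
--         act = chev.get('act')
--         if good:
--             if act == 'crush':
--                 gc += 1
--             elif act == 'grab':
--                 gg += 1
--         else:
--             if act == 'crush':
--                 bc += 1
--             elif act == 'grab':
--                 bg += 1
--     return gg, gc, bg, bc
-- ===== SOURCE B (Python) =====
-- def count_chevrons(chevron_list):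
--     keys = [(bool(chev.get('good')), chev.get('act')) for chev in chevron_list]
--     return (keys.count((True, 'grab')), keys.count((True, 'crush')),
--             keys.count((False, 'grab')), keys.count((False, 'crush')))
-- ===== Notes on version B (the rewrite author's own statement) =====
-- stated objective: simpler
-- what changed: Replaces the single-pass four-way branch tree with a staged computation: normalize each entry to a (bool(good), act) key list once, then obtain each of the four results by a separate list.count pass, with no running accumulators or branches.
import Mathlib
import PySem

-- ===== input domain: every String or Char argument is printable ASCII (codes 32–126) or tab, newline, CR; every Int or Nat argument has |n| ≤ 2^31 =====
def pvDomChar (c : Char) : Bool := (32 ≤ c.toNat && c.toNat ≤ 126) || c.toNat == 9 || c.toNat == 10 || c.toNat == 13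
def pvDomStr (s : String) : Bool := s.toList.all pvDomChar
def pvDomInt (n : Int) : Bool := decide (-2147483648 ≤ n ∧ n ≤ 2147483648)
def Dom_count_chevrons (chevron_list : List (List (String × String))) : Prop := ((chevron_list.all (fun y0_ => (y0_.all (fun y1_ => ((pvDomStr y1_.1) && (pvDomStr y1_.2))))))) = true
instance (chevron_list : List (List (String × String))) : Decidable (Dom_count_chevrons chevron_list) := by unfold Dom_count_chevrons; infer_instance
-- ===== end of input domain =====

-- B replaces A's single-pass four-way branch tree with a staged map-to-keys pass plus four list.count passes; objective: simpler.


-- Python truthiness of an optional string: None and '' are falsy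
def pvTruthy (o : Option String) : Bool :=
  match o with
  | none => false
  | some s => !(s == "")

-- ===== PORT A =====
def pvStepA (st : Int × Int × Int × Int) (chev : List (String × String)) : Int × Int × Int × Int :=
  let (gg, bg, gc, bc) := st
  let good := (PySem.Dict.mk chev).get? "good"
  let act := (PySem.Dict.mk chev).get? "act"
  if pvTruthy good then
    if act == some "crush" then (gg, bg, gc + 1, bc)
    else if act == some "grab" then (gg + 1, bg, gc, bc)
    else (gg, bg, gc, bc)
  else
    if act == some "crush" then (gg, bg, gc, bc + 1)
    else if act == some "grab" then (gg, bg + 1, gc, bc)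
    else (gg, bg, gc, bc)

def count_chevrons (chevron_list : List (List (String × String))) : Int × Int × Int × Int :=
  let r := chevron_list.foldl pvStepA (0, 0, 0, 0)
  (r.1, r.2.2.1, r.2.1, r.2.2.2)

-- ===== PORT B =====
-- key of one entry: (bool(chev.get('good')), chev.get('act'))
def pvKey (chev : List (String × String)) : Bool × Option String :=
  (pvTruthy ((PySem.Dict.mk chev).get? "good"), (PySem.Dict.mk chev).get? "act")

def count_chevrons_alt (chevron_list : List (List (String × String))) : Int × Int × Int × Int :=
  let keys := chevron_list.map pvKey
  ((PySem.List.count keys (true, some "grab") : Int),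
   (PySem.List.count keys (true, some "crush") : Int),
   (PySem.List.count keys (false, some "grab") : Int),
   (PySem.List.count keys (false, some "crush") : Int))

-- ===== PRECONDITION & SPEC =====
def Spec_count_chevrons (chevron_list : List (List (String × String))) (out : Int × Int × Int × Int) : Prop := out = count_chevrons_alt chevron_list
instance (chevron_list : List (List (String × String))) (out : Int × Int × Int × Int) : Decidable (Spec_count_chevrons chevron_list out) := by unfold Spec_count_chevrons; infer_instance

-- ===== CLAIM (what is proved, stated in full; the proofs are below) =====
def Claim_equal_count_chevrons : Prop := ∀ (chevron_list : List (List (String × String))), Dom_count_chevrons chevron_list → Spec_count_chevrons chevron_list (count_chevrons chevron_list)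

-- ===== LEMMAS AND PROOFS =====

-- A's loop starting from an arbitrary accumulator adds the per-key counts of the mapped key list
lemma countA_loop (l : List (List (String × String))) (gg bg gc bc : Int) :
    l.foldl pvStepA (gg, bg, gc, bc)
    = (gg + ((l.map pvKey).count (true, some "grab") : Int),
       bg + ((l.map pvKey).count (false, some "grab") : Int),
       gc + ((l.map pvKey).count (true, some "crush") : Int),
       bc + ((l.map pvKey).count (false, some "crush") : Int)) := by
  induction l generalizing gg bg gc bc with
  | nil => simp
  | cons hd tl ih =>
    rw [List.foldl_cons]
    by_cases hg : pvTruthy ((PySem.Dict.mk hd).get? "good")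
    · rcases hact : (PySem.Dict.mk hd).get? "act" with _ | s
      · have hs : pvStepA (gg, bg, gc, bc) hd = (gg, bg, gc, bc) := by
          simp [pvStepA, hg, hact]
        rw [hs, ih]
        simp [pvKey, hg, hact]
      · by_cases hc : s = "crush"
        · have hs : pvStepA (gg, bg, gc, bc) hd = (gg, bg, gc + 1, bc) := by
            simp [pvStepA, hg, hact, hc]
          rw [hs, ih]
          simp [pvKey, hg, hact, hc]
          omega
        · by_cases hgr : s = "grab"
          · have hs : pvStepA (gg, bg, gc, bc) hd = (gg + 1, bg, gc, bc) := by
              simp [pvStepA, hg, hact, hgr]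
            rw [hs, ih]
            simp [pvKey, hg, hact, hgr]
            omega
          · have hs : pvStepA (gg, bg, gc, bc) hd = (gg, bg, gc, bc) := by
              simp [pvStepA, hg, hact, hc, hgr]
            rw [hs, ih]
            simp [pvKey, hg, hact, hc, hgr]
    · rcases hact : (PySem.Dict.mk hd).get? "act" with _ | s
      · have hs : pvStepA (gg, bg, gc, bc) hd = (gg, bg, gc, bc) := by
          simp [pvStepA, hg, hact]
        rw [hs, ih]
        simp [pvKey, hg, hact]
      · by_cases hc : s = "crush"
        · have hs : pvStepA (gg, bg, gc, bc) hd = (gg, bg, gc, bc + 1) := by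
            simp [pvStepA, hg, hact, hc]
          rw [hs, ih]
          simp [pvKey, hg, hact, hc]
          omega
        · by_cases hgr : s = "grab"
          · have hs : pvStepA (gg, bg, gc, bc) hd = (gg, bg + 1, gc, bc) := by
              simp [pvStepA, hg, hact, hgr]
            rw [hs, ih]
            simp [pvKey, hg, hact, hgr]
            omega
          · have hs : pvStepA (gg, bg, gc, bc) hd = (gg, bg, gc, bc) := by
              simp [pvStepA, hg, hact, hc, hgr]
            rw [hs, ih]
            simp [pvKey, hg, hact, hc, hgr]

-- ===== VERDICT (by name: the statement is the Claim_ definition above) =====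
theorem count_chevrons_spec : Claim_equal_count_chevrons := by
  intro cl _
  show count_chevrons cl = count_chevrons_alt cl
  unfold count_chevrons count_chevrons_alt
  rw [countA_loop]
  simp [PySem.List.count_eq]
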